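-- pv_equiv track=rewrite | github.com/jbeda/porkbun-ddns | Docker/entrypoint.py | FindUpdatedRecords
-- ===== SOURCE A (Python) =====
-- def FindUpdatedRecords(before, after):
--     ret = []
--     for k, v in before.items():
--         if k in after and after[k] != v:
--             ret.append(f"Record {k} changed from {v} to {after[k]}")
--     for k, v in after.items():
--         if k not in before:
--             ret.append(f"Record {k} added with value {v}")
--     for k, v in before.items():
--         if k not in after:
--             ret.append(f"Record {k} with value {v} removed")
--     return ret
-- ===== SOURCE B (Python) =====
-- def FindUpdatedRecords(before, after):
--     # Merge both dicts into one map k -> (before-value or None, after-value or None),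
--     # then classify each merged entry in a single pass into three buckets.
--     merged = {k: (v, None) for k, v in before.items()}
--     for k, v in after.items():
--         merged[k] = (merged[k][0] if k in merged else None, v)
--     changed, added, removed = [], [], []
--     for k, (bv, av) in merged.items():
--         if bv is None:
--             added.append(f"Record {k} added with value {av}")
--         elif av is None:
--             removed.append(f"Record {k} with value {bv} removed")
--         elif av != bv:
--             changed.append(f"Record {k} changed from {bv} to {av}")
--     return changed + added + removed
-- ===== Notes on version B (the rewrite author's own statement) =====
-- stated objective: alternative
-- what changed: Instead of A's three separate membership-test passes, B first merges both dicts into a single map k -> (before-value or None, after-value or None) and then classifies each merged entry in one pass into changed/added/removed buckets, returning changed + added + removed.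
import Mathlib
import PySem

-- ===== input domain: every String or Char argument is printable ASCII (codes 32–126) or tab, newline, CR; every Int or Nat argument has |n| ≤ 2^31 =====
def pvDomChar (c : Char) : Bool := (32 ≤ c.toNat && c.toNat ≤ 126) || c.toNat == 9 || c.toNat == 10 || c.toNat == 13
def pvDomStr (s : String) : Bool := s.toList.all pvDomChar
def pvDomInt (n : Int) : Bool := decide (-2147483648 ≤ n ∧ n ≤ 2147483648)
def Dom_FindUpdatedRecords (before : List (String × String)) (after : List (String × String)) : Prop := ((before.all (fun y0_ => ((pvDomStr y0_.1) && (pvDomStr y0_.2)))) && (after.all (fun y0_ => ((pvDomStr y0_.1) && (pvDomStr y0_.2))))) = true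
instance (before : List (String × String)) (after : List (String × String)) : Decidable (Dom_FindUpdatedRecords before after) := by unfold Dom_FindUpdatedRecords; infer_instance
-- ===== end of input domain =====

-- B merges the two dicts into one map k ↦ (before-value?, after-value?) and classifies each
-- merged entry in a single pass into changed/added/removed buckets (objective: alternative).

-- ===== PORT A =====
-- A's dict parameters arrive as association lists; as in Python dict construction,
-- duplicates collapse (last value wins, first position kept) via PySem.Dict.ofList.
def FindUpdatedRecords (before : List (String × String)) (after : List (String × String)) : List String :=
  let b := PySem.Dict.ofList before
  let a := PySem.Dict.ofList after
  -- `k in after and after[k] != v`; `a.getD kv.1 ""` is `after[k]` (the key is present when read)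
  let ret := b.items.foldl (fun ret kv =>
    if a.contains kv.1 && (a.getD kv.1 "" != kv.2) then
      ret ++ ["Record " ++ kv.1 ++ " changed from " ++ kv.2 ++ " to " ++ a.getD kv.1 ""]
    else ret) []
  let ret := a.items.foldl (fun ret kv =>
    if !b.contains kv.1 then ret ++ ["Record " ++ kv.1 ++ " added with value " ++ kv.2] else ret) ret
  b.items.foldl (fun ret kv =>
    if !a.contains kv.1 then ret ++ ["Record " ++ kv.1 ++ " with value " ++ kv.2 ++ " removed"] else ret) ret

-- ===== PORT B =====
-- `merged[k] = (merged[k][0] if k in merged else None, v)` (the guarded lookup of Source B's merge loop)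
def pvMergeStep (d : PySem.Dict String (Option String × Option String)) (kv : String × String) :
    PySem.Dict String (Option String × Option String) :=
  d.insert kv.1 ((if d.contains kv.1 then (d.getD kv.1 (none, none)).1 else none), some kv.2)

-- the classifying loop body of Source B (buckets: changed, added, removed); in the added branch the
-- after-value is always present, `Option.getD ""` only totalises the unreachable `none` case
def pvClassify (acc : List String × List String × List String)
    (kp : String × (Option String × Option String)) : List String × List String × List String :=
  match kp.2.1, kp.2.2 with
  | none, av => (acc.1, acc.2.1 ++ ["Record " ++ kp.1 ++ " added with value " ++ av.getD ""], acc.2.2)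
  | some bv, none => (acc.1, acc.2.1, acc.2.2 ++ ["Record " ++ kp.1 ++ " with value " ++ bv ++ " removed"])
  | some bv, some av =>
      if av ≠ bv then (acc.1 ++ ["Record " ++ kp.1 ++ " changed from " ++ bv ++ " to " ++ av], acc.2.1, acc.2.2)
      else acc

def FindUpdatedRecords_alt (before : List (String × String)) (after : List (String × String)) : List String :=
  let b := PySem.Dict.ofList before
  let a := PySem.Dict.ofList after
  let merged0 : PySem.Dict String (Option String × Option String) :=
    b.items.foldl (fun d kv => d.insert kv.1 (some kv.2, none)) PySem.Dict.empty
  let merged := a.items.foldl pvMergeStep merged0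
  let car := merged.items.foldl pvClassify ([], [], [])
  car.1 ++ car.2.1 ++ car.2.2

-- ===== PRECONDITION & SPEC =====
def Spec_FindUpdatedRecords (before : List (String × String)) (after : List (String × String)) (out : List String) : Prop := out = FindUpdatedRecords_alt before after
instance (before : List (String × String)) (after : List (String × String)) (out : List String) : Decidable (Spec_FindUpdatedRecords before after out) := by unfold Spec_FindUpdatedRecords; infer_instance

-- ===== CLAIM (what is proved, stated in full; the proofs are below) =====
def Claim_equal_FindUpdatedRecords : Prop := ∀ (before : List (String × String)) (after : List (String × String)), Dom_FindUpdatedRecords before after → Spec_FindUpdatedRecords before after (FindUpdatedRecords before after)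

-- ===== LEMMAS AND PROOFS =====

def pvU (bs : List (String × String)) (g : String → Option String) :
    List (String × (Option String × Option String)) :=
  bs.map (fun q => (q.1, (some q.2, g q.1)))

theorem pvMerge_loop (bs : List (String × String)) (hbs : (bs.map Prod.fst).Nodup)
    (l : List (String × String)) (hl : (l.map Prod.fst).Nodup)
    (t : List (String × (Option String × Option String))) (g : String → Option String)
    (htl : ∀ k ∈ t.map Prod.fst, k ∉ l.map Prod.fst)
    (htb : ∀ k ∈ t.map Prod.fst, k ∉ bs.map Prod.fst) :
    l.foldl pvMergeStep (PySem.Dict.mk (pvU bs g ++ t))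
      = PySem.Dict.mk (pvU bs (fun x => match l.find? (fun p => p.1 == x) with
          | some p => some p.2 | none => g x) ++ t
          ++ (l.filter (fun p => !decide (p.1 ∈ bs.map Prod.fst))).map (fun p => (p.1, (none, some p.2)))) := by
  induction l generalizing t g with
  | nil => simp
  | cons kv l' ih =>
    have hl2 : kv.1 ∉ l'.map Prod.fst ∧ (l'.map Prod.fst).Nodup := by
      rw [List.map_cons, List.nodup_cons] at hl; exact hl
    have htkv : kv.1 ∉ t.map Prod.fst := fun hmem => htl kv.1 hmem (by simp)
    have htany : t.any (fun p => p.1 == kv.1) = false := by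
      simp only [List.any_eq_false, beq_iff_eq]
      intro p hp he
      exact htkv (he ▸ List.mem_map_of_mem hp)
    rw [List.foldl_cons]
    have htl' : ∀ k ∈ t.map Prod.fst, k ∉ l'.map Prod.fst := by
      intro k hm hmem
      exact htl k hm (by simp [hmem])
    by_cases hk : kv.1 ∈ bs.map Prod.fst
    · -- key of kv is in bs: insert overwrites the pvU entry in place
      have hfind : (bs.find? (fun p => p.1 == kv.1)).isSome := by
        obtain ⟨k0, hk0mem, hk0⟩ := List.mem_map.mp hk
        exact List.find?_isSome.mpr ⟨k0, hk0mem, by simp [hk0]⟩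
      obtain ⟨q0, hq0⟩ := Option.isSome_iff_exists.mp hfind
      have hq0mem : q0 ∈ bs := List.mem_of_find?_eq_some hq0
      have hq0key : q0.1 = kv.1 := by simpa using List.find?_some hq0
      have hcont : (PySem.Dict.mk (pvU bs g ++ t)).contains kv.1 = true := by
        simp only [PySem.Dict.contains, List.any_append, pvU, List.any_map, htany,
          Bool.or_false, List.any_eq_true]
        exact ⟨q0, hq0mem, by simp [hq0key]⟩
      have hget : (PySem.Dict.mk (pvU bs g ++ t)).get? kv.1 = some (some q0.2, g q0.1) := by
        simp only [PySem.Dict.get?, List.find?_append, pvU, List.find?_map]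
        simp [Function.comp_def, hq0]
      have hstep : pvMergeStep (PySem.Dict.mk (pvU bs g ++ t)) kv
          = PySem.Dict.mk (pvU bs (fun x => if x = kv.1 then some kv.2 else g x) ++ t) := by
        unfold pvMergeStep
        rw [hcont, PySem.Dict.getD_eq_get?_getD, hget]
        simp only [if_true, Option.getD_some]
        apply PySem.Dict.ext
        simp only [PySem.Dict.insert, hcont, if_true, List.map_append]
        congr 1
        · simp only [pvU, List.map_map]
          apply List.map_congr_left
          intro q hq
          by_cases hqk : q.1 = kv.1
          · have hqq0 : q = q0 := List.inj_on_of_nodup_map hbs hq hq0mem (hqk.trans hq0key.symm)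
            simp [hqq0, hq0key]
          · simp [hqk]
        · refine (List.map_congr_left (fun p hp => ?_)).trans (List.map_id t)
          have hpk : p.1 ≠ kv.1 := fun he => htkv (he ▸ List.mem_map_of_mem hp)
          simp [hpk]
      rw [hstep, ih hl2.2 t _ htl' htb, List.filter_cons_of_neg (by simp [hk])]
      congr 1
      congr 1
      congr 1
      apply List.map_congr_left
      intro q hq
      by_cases hqk : q.1 = kv.1
      · have hnone : l'.find? (fun p => p.1 == q.1) = none := by
          rw [List.find?_eq_none]
          intro p hp
          simp only [beq_iff_eq, hqk]
          intro he
          exact hl2.1 (he ▸ List.mem_map_of_mem hp)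
        rw [hqk] at hnone
        simp [hqk, hnone]
      · have hne : (kv.1 == q.1) = false := by simp [Ne.symm hqk]
        simp only [List.find?_cons, hne]
        cases hfl : l'.find? (fun p => p.1 == q.1) with
        | none => exact congrArg (fun o => (q.1, some q.2, o)) (if_neg hqk)
        | some p => rfl
    · -- fresh key: insert appends
      have hcont : (PySem.Dict.mk (pvU bs g ++ t)).contains kv.1 = false := by
        simp only [PySem.Dict.contains, List.any_append, pvU, List.any_map, htany,
          Bool.or_false, List.any_eq_false]
        intro q hq
        simp only [beq_iff_eq, Function.comp_def]
        intro he
        exact hk (he ▸ List.mem_map_of_mem hq)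
      have hstep : pvMergeStep (PySem.Dict.mk (pvU bs g ++ t)) kv
          = PySem.Dict.mk (pvU bs g ++ (t ++ [(kv.1, ((none : Option String), some kv.2))])) := by
        unfold pvMergeStep
        rw [hcont]
        apply PySem.Dict.ext
        simp only [PySem.Dict.insert, hcont, Bool.false_eq_true, if_false,
          List.append_assoc]
      have htl'' : ∀ k ∈ (t ++ [(kv.1, ((none : Option String), some kv.2))]).map Prod.fst, k ∉ l'.map Prod.fst := by
        intro k hm
        rw [List.map_append] at hm
        rcases List.mem_append.mp hm with h | h
        · exact htl' k h
        · simp at h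
          exact h ▸ hl2.1
      have htb'' : ∀ k ∈ (t ++ [(kv.1, ((none : Option String), some kv.2))]).map Prod.fst, k ∉ bs.map Prod.fst := by
        intro k hm
        rw [List.map_append] at hm
        rcases List.mem_append.mp hm with h | h
        · exact htb k h
        · simp at h
          exact h ▸ hk
      rw [hstep, ih hl2.2 _ g htl'' htb'']
      rw [List.filter_cons_of_pos (by simp [hk])]
      simp only [List.map_cons, List.append_assoc, List.singleton_append]
      congr 1
      congr 1
      simp only [pvU]
      apply List.map_congr_left
      intro q hq
      have hqk : q.1 ≠ kv.1 := fun he => hk (he ▸ List.mem_map_of_mem hq)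
      have hne : (kv.1 == q.1) = false := by simp [Ne.symm hqk]
      simp only [List.find?_cons, hne]

def pvChgP (kp : String × (Option String × Option String)) : Bool :=
  match kp.2.1, kp.2.2 with
  | some bv, some av => av != bv
  | _, _ => false
def pvChgF (kp : String × (Option String × Option String)) : String :=
  "Record " ++ kp.1 ++ " changed from " ++ kp.2.1.getD "" ++ " to " ++ kp.2.2.getD ""
def pvAddP (kp : String × (Option String × Option String)) : Bool := kp.2.1.isNone
def pvAddF (kp : String × (Option String × Option String)) : String :=
  "Record " ++ kp.1 ++ " added with value " ++ kp.2.2.getD ""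
def pvRemP (kp : String × (Option String × Option String)) : Bool :=
  kp.2.1.isSome && kp.2.2.isNone
def pvRemF (kp : String × (Option String × Option String)) : String :=
  "Record " ++ kp.1 ++ " with value " ++ kp.2.1.getD "" ++ " removed"

theorem pvClassify_foldl (l : List (String × (Option String × Option String)))
    (acc : List String × List String × List String) :
    l.foldl pvClassify acc
      = (acc.1 ++ (l.filter pvChgP).map pvChgF,
         acc.2.1 ++ (l.filter pvAddP).map pvAddF,
         acc.2.2 ++ (l.filter pvRemP).map pvRemF) := by
  induction l generalizing acc with
  | nil => simp
  | cons kp r ih =>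
    obtain ⟨k, bv, av⟩ := kp
    rw [List.foldl_cons, ih]
    cases bv with
    | none => simp [pvClassify, pvChgP, pvAddP, pvRemP, pvAddF]
    | some bv =>
      cases av with
      | none => simp [pvClassify, pvChgP, pvAddP, pvRemP, pvRemF]
      | some av =>
        by_cases hab : av = bv
        · simp [pvClassify, pvChgP, pvAddP, pvRemP, hab]
        · simp [pvClassify, pvChgP, pvAddP, pvRemP, pvChgF, hab]

-- ===== VERDICT (by name: the statement is the Claim_ definition above) =====
theorem FindUpdatedRecords_spec : Claim_equal_FindUpdatedRecords := by
  intro before after _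
  unfold Spec_FindUpdatedRecords FindUpdatedRecords FindUpdatedRecords_alt
  dsimp only
  set b := PySem.Dict.ofList before with hb
  set a := PySem.Dict.ofList after with ha
  have hbnd : (b.items.map Prod.fst).Nodup := PySem.Dict.nodup_keys_ofList before
  have hand : (a.items.map Prod.fst).Nodup := PySem.Dict.nodup_keys_ofList after
  -- the initial merge dict
  have h0 : b.items.foldl (fun d kv => d.insert kv.1 ((some kv.2 : Option String), (none : Option String))) PySem.Dict.empty
      = PySem.Dict.mk (pvU b.items (fun _ => none)) := by
    apply PySem.Dict.ext
    rw [PySem.Dict.items_foldl_insert_fresh b.items (fun kv => kv.1) (fun kv => (some kv.2, none))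
      PySem.Dict.empty (fun x _ => PySem.Dict.contains_empty x.1) hbnd]
    simp [pvU, PySem.Dict.empty]
  rw [h0]
  have hmerge := pvMerge_loop b.items hbnd a.items hand [] (fun _ => none)
    (by simp) (by simp)
  rw [List.append_nil] at hmerge
  rw [hmerge, pvClassify_foldl]
  simp only [List.nil_append, List.filter_append, List.map_append]
  -- A's three loops
  rw [PySem.List.foldl_append_if (fun kv => a.contains kv.1 && (a.getD kv.1 "" != kv.2))
        (fun kv => "Record " ++ kv.1 ++ " changed from " ++ kv.2 ++ " to " ++ a.getD kv.1 "") b.items,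
      PySem.List.foldl_append_if (fun kv => !b.contains kv.1)
        (fun kv => "Record " ++ kv.1 ++ " added with value " ++ kv.2) a.items,
      PySem.List.foldl_append_if (fun kv => !a.contains kv.1)
        (fun kv => "Record " ++ kv.1 ++ " with value " ++ kv.2 ++ " removed") b.items]
  -- notation: G is the merged after-value function; it IS a.get?
  have hG : ∀ x : String, (match a.items.find? (fun p => p.1 == x) with
      | some p => some p.2 | none => (none : Option String)) = a.get? x := by
    intro x
    simp only [PySem.Dict.get?]
    cases a.items.find? (fun p => p.1 == x) <;> rfl
  -- the before-segment of the merged items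
  have hchgU : ((pvU b.items (fun x => match a.items.find? (fun p => p.1 == x) with
        | some p => some p.2 | none => none)).filter pvChgP).map pvChgF
      = (b.items.filter (fun kv => a.contains kv.1 && (a.getD kv.1 "" != kv.2))).map
          (fun kv => "Record " ++ kv.1 ++ " changed from " ++ kv.2 ++ " to " ++ a.getD kv.1 "") := by
    simp only [pvU, List.filter_map, List.map_map]
    rw [List.filter_congr (fun kv _ => ?_)]
    · apply List.map_congr_left
      intro kv _
      simp only [Function.comp_def, pvChgF, Option.getD_some, PySem.Dict.getD_eq_get?_getD, hG]
    · simp only [Function.comp_def, pvChgP, hG]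
      cases hw : a.get? kv.1 with
      | none => simp [PySem.Dict.contains_eq_isSome_get?, hw]
      | some w => simp [PySem.Dict.contains_eq_isSome_get?, hw, PySem.Dict.getD_of_get?_eq_some a "" hw]
  have hremU : ((pvU b.items (fun x => match a.items.find? (fun p => p.1 == x) with
        | some p => some p.2 | none => none)).filter pvRemP).map pvRemF
      = (b.items.filter (fun kv => !a.contains kv.1)).map
          (fun kv => "Record " ++ kv.1 ++ " with value " ++ kv.2 ++ " removed") := by
    simp only [pvU, List.filter_map, List.map_map]
    rw [List.filter_congr (fun kv _ => ?_)]
    · apply List.map_congr_left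
      intro kv _
      simp only [Function.comp_def, pvRemF, Option.getD_some]
    · simp only [Function.comp_def, pvRemP, hG]
      cases hw : a.get? kv.1 with
      | none => simp [PySem.Dict.contains_eq_isSome_get?, hw]
      | some w => simp [PySem.Dict.contains_eq_isSome_get?, hw]
  have haddU : ((pvU b.items (fun x => match a.items.find? (fun p => p.1 == x) with
        | some p => some p.2 | none => none)).filter pvAddP).map pvAddF = [] := by
    simp only [pvU, List.filter_map]
    rw [List.filter_congr (fun kv _ => ?_) (q := fun _ => false)]
    · simp
    · simp [pvAddP]
  -- the appended fresh-key segment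
  have hm := fun (P : (String × (Option String × Option String)) → Bool) =>
    List.filter_map (f := fun p : String × String => (p.1, ((none : Option String), some p.2)))
      (p := P) (l := a.items.filter (fun p => !decide (p.1 ∈ b.items.map Prod.fst)))
  have hchgM : (((a.items.filter (fun p => !decide (p.1 ∈ b.items.map Prod.fst))).map
        (fun p => (p.1, ((none : Option String), some p.2)))).filter pvChgP).map pvChgF = [] := by
    rw [hm pvChgP]
    rw [List.filter_congr (fun kv _ => ?_) (q := fun _ => false)]
    · simp
    · simp [pvChgP]
  have hremM : (((a.items.filter (fun p => !decide (p.1 ∈ b.items.map Prod.fst))).map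
        (fun p => (p.1, ((none : Option String), some p.2)))).filter pvRemP).map pvRemF = [] := by
    rw [hm pvRemP]
    rw [List.filter_congr (fun kv _ => ?_) (q := fun _ => false)]
    · simp
    · simp [pvRemP]
  have haddM : (((a.items.filter (fun p => !decide (p.1 ∈ b.items.map Prod.fst))).map
        (fun p => (p.1, ((none : Option String), some p.2)))).filter pvAddP).map pvAddF
      = (a.items.filter (fun kv => !b.contains kv.1)).map
          (fun kv => "Record " ++ kv.1 ++ " added with value " ++ kv.2) := by
    rw [hm pvAddP]
    rw [List.filter_congr (fun kv _ => ?_) (q := fun _ => true), List.filter_true, List.map_map]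
    · rw [List.filter_congr (fun kv _ => ?_)]
      · apply List.map_congr_left
        intro kv _
        simp [pvAddF]
      · have : b.contains kv.1 = decide (kv.1 ∈ b.items.map Prod.fst) :=
          PySem.Dict.contains_eq_decide_mem_keys b kv.1
        rw [this]
    · simp [pvAddP]
  rw [hchgU, hremU, haddU, hchgM, hremM, haddM]
  simp
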